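-- pv_equiv track=rewrite | github.com/SoumyaMishra03/Conversql | base_tokenizers_for_all_datasets/space_missions_tokenizer.py | combine_schema_tokens
-- ===== SOURCE A (Python) =====
-- schema_phrases= [
--     # Table names
--     "organizations",
--     "rockets",
--     "missions",
--
--     # Common column
--     "organisation",
--
--     # organizations table
--     "location",
--
--     # rockets table
--     "details",
--     "rocket_status",
--     "price",
--
--     # missions table
--     "mission_status",
--
--     # id column
--     "id"
-- ]
--
-- def combine_schema_tokens(tokens):
--     combined_tokens = []
--     i = 0
--     max_phrase_length = 5
--     while i < len(tokens):
--         match_found = False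
--         for j in range(max_phrase_length, 0, -1):
--             if i + j <= len(tokens):
--                 phrase = " ".join(tokens[i:i+j])
--                 if phrase in schema_phrases:
--                     combined_tokens.append(phrase)
--                     i += j
--                     match_found = True
--                     break
--         if not match_found:
--             combined_tokens.append(tokens[i])
--             i += 1
--     return combined_tokens
-- ===== SOURCE B (Python) =====
-- def combine_schema_tokens(tokens):
--     # No schema phrase contains a space, so a joined multi-token candidate (j > 1)
--     # can never match, and a single-token match appends the token itself: every
--     # position contributes exactly tokens[i].  The merge is an element-wise copy.
--     return [tokens[i] for i in range(len(tokens))]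
-- ===== Notes on version B (the rewrite author's own statement) =====
-- stated objective: simpler
-- what changed: Since no schema phrase contains a space, a joined multi-token candidate can never match and a single-token match appends the token itself, so the whole greedy merge loop collapses to an element-wise copy of the input.
import Mathlib
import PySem

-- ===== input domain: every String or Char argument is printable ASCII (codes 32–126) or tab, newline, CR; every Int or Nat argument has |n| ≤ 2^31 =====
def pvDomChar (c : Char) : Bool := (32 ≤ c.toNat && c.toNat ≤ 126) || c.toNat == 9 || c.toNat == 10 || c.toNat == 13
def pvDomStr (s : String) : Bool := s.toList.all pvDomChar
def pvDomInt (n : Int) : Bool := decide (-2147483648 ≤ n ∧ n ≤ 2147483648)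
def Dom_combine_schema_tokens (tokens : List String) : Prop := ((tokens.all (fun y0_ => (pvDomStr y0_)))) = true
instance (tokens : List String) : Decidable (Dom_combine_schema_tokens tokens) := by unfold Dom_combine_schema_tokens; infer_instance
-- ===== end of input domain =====

-- B replaces A's greedy phrase-merging loop by an element-wise copy: no schema phrase
-- contains a space, so only single-token matches can fire, and those append the token itself.

-- ===== PORT A =====
def schema_phrases : List String :=
  ["organizations", "rockets", "missions", "organisation", "location",
   "details", "rocket_status", "price", "mission_status", "id"]

-- inner 'for j in range(max_phrase_length, 0, -1): … break' : first j (from 5 down to 1)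
-- whose joined slice is a schema phrase, together with that phrase
def pvInner (tokens : List String) (i : Nat) : Option (String × Nat) :=
  ([5, 4, 3, 2, 1] : List Nat).findSome? (fun j =>
    if i + j ≤ tokens.length then
      if PySem.Str.join " " (PySem.List.slice tokens (some (i : Int)) (some ((i + j : Nat) : Int))) ∈ schema_phrases then
        some (PySem.Str.join " " (PySem.List.slice tokens (some (i : Int)) (some ((i + j : Nat) : Int))), j)
      else none
    else none)

theorem pvInner_pos {tokens : List String} {i : Nat} {pj : String × Nat}
    (h : pvInner tokens i = some pj) : 1 ≤ pj.2 := by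
  obtain ⟨j, hj, hfj⟩ := List.exists_of_findSome?_eq_some h
  have hj2 : pj.2 = j := by
    by_cases h1 : i + j ≤ tokens.length
    · simp only [if_pos h1] at hfj
      by_cases h2 : PySem.Str.join " " (PySem.List.slice tokens (some (i : Int)) (some ((i + j : Nat) : Int))) ∈ schema_phrases
      · rw [if_pos h2] at hfj
        cases hfj; rfl
      · rw [if_neg h2] at hfj; cases hfj
    · rw [if_neg h1] at hfj; cases hfj
  fin_cases hj <;> omega

-- the while loop of A
def combineLoop (tokens : List String) (i : Nat) (acc : List String) : List String :=
  if h : i < tokens.length then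
    match hm : pvInner tokens i with
    | some (phrase, j) => combineLoop tokens (i + j) (acc ++ [phrase])
    | none => combineLoop tokens (i + 1) (acc ++ [tokens[i]])
  else acc
termination_by tokens.length - i
decreasing_by
  · have := pvInner_pos hm; omega
  · omega

def combine_schema_tokens (tokens : List String) : List String :=
  combineLoop tokens 0 []

-- ===== PORT B =====
def combine_schema_tokens_alt (tokens : List String) : List String :=
  (PySem.List.pyRange 0 (tokens.length : Int) 1).map (fun i => PySem.List.pyGetD tokens i "")

-- ===== PRECONDITION & SPEC =====
def Spec_combine_schema_tokens (tokens : List String) (out : List String) : Prop := out = combine_schema_tokens_alt tokens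
instance (tokens : List String) (out : List String) : Decidable (Spec_combine_schema_tokens tokens out) := by unfold Spec_combine_schema_tokens; infer_instance

-- ===== CLAIM (what is proved, stated in full; the proofs are below) =====
def Claim_equal_combine_schema_tokens : Prop := ∀ (tokens : List String), Dom_combine_schema_tokens tokens → Spec_combine_schema_tokens tokens (combine_schema_tokens tokens)

-- ===== LEMMAS AND PROOFS =====

-- no schema phrase contains a space
theorem schema_no_space : ∀ p ∈ schema_phrases, ' ' ∉ p.toList := by decide

-- a join of two or more tokens contains a space
theorem space_mem_join (a b : String) (rest : List String) :
    ' ' ∈ (PySem.Str.join " " (a :: b :: rest)).toList := by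
  rw [PySem.Str.toList_join]
  simp only [List.map_cons]
  rw [PySem.Chars.join_cons_cons]
  have hs : (" " : String).toList = [' '] := rfl
  simp [hs, List.mem_append]

theorem slice_singleton (tokens : List String) (i : Nat) (h : i < tokens.length) :
    PySem.List.slice tokens (some (i : Int)) (some ((i + 1 : Nat) : Int)) = [tokens[i]] := by
  rw [PySem.List.slice_toNat tokens (by positivity) (by positivity)]
  have h1 : ((i + 1 : Nat) : Int).toNat = i + 1 := by omega
  have h2 : ((i : Nat) : Int).toNat = i := by omega
  rw [h1, h2]
  have : i + 1 - i = 1 := by omega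
  rw [this]
  simp [List.take_one, List.getElem?_eq_getElem h]

-- a slice of length ≥ 2, joined, is never a schema phrase
theorem long_slice_no_match (tokens : List String) (i j : Nat) (hj : 2 ≤ j)
    (hlen : i + j ≤ tokens.length) :
    PySem.Str.join " " (PySem.List.slice tokens (some (i : Int)) (some ((i + j : Nat) : Int))) ∉ schema_phrases := by
  have hsl : (PySem.List.slice tokens (some (i : Int)) (some ((i + j : Nat) : Int))).length = j := by
    rw [PySem.List.slice_toNat tokens (by positivity) (by positivity)]
    simp; omega
  intro hmem
  rcases hc : PySem.List.slice tokens (some (i : Int)) (some ((i + j : Nat) : Int)) with _ | ⟨a, l'⟩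
  · rw [hc] at hsl; simp at hsl; omega
  rcases hc' : l' with _ | ⟨b, l''⟩
  · rw [hc, hc'] at hsl; simp at hsl; omega
  rw [hc, hc'] at hmem
  exact schema_no_space _ hmem (space_mem_join a b l'')

-- characterisation of the inner loop: only j = 1 can fire, yielding the token itself
theorem pvInner_eq (tokens : List String) (i : Nat) (h : i < tokens.length) :
    pvInner tokens i =
      if tokens[i] ∈ schema_phrases then some (tokens[i], 1) else none := by
  unfold pvInner
  have step : ∀ j : Nat, 2 ≤ j →
      (if i + j ≤ tokens.length then
        if PySem.Str.join " " (PySem.List.slice tokens (some (i : Int)) (some ((i + j : Nat) : Int))) ∈ schema_phrases then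
          some (PySem.Str.join " " (PySem.List.slice tokens (some (i : Int)) (some ((i + j : Nat) : Int))), j)
        else none
      else (none : Option (String × Nat))) = none := by
    intro j hj
    by_cases h1 : i + j ≤ tokens.length
    · rw [if_pos h1, if_neg (long_slice_no_match tokens i j hj h1)]
    · rw [if_neg h1]
  have hjoin1 : PySem.Str.join " " (PySem.List.slice tokens (some (i : Int)) (some ((i + 1 : Nat) : Int))) = tokens[i] := by
    rw [slice_singleton tokens i h]
    apply String.toList_injective
    rw [PySem.Str.toList_join]
    simp [PySem.Chars.join_singleton]
  simp only [List.findSome?_cons, step 5 (by omega), step 4 (by omega), step 3 (by omega),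
    step 2 (by omega), List.findSome?_nil]
  rw [if_pos (by omega : i + 1 ≤ tokens.length), hjoin1]
  split <;> simp_all

-- the while loop just copies the remaining tokens
theorem combineLoop_eq (tokens : List String) : ∀ (n i : Nat) (acc : List String),
    tokens.length - i ≤ n → combineLoop tokens i acc = acc ++ tokens.drop i := by
  intro n
  induction n with
  | zero =>
    intro i acc hn
    rw [combineLoop, dif_neg (by omega), List.drop_eq_nil_of_le (by omega), List.append_nil]
  | succ n ih =>
    intro i acc hn
    rw [combineLoop]
    by_cases h : i < tokens.length
    · rw [dif_pos h]
      have hdrop : tokens.drop i = tokens[i] :: tokens.drop (i + 1) := List.drop_eq_getElem_cons h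
      split
      · rename_i phrase j hm
        rw [pvInner_eq tokens i h] at hm
        split_ifs at hm with hmem
        · injection hm with hm'
          cases hm'
          rw [ih (i + 1) (acc ++ [tokens[i]]) (by omega), hdrop]
          simp
      · rename_i hm
        rw [ih (i + 1) (acc ++ [tokens[i]]) (by omega), hdrop]
        simp
    · rw [dif_neg h, List.drop_eq_nil_of_le (by omega), List.append_nil]

-- ===== VERDICT (by name: the statement is the Claim_ definition above) =====
theorem combine_schema_tokens_spec : Claim_equal_combine_schema_tokens := by
  intro tokens _
  unfold Spec_combine_schema_tokens combine_schema_tokens combine_schema_tokens_alt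
  rw [combineLoop_eq tokens tokens.length 0 [] (by omega)]
  simpa using (PySem.List.map_pyGetD_pyRange_zero' tokens "").symm
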